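-- pv_equiv track=rewrite | github.com/Rain7232/cli-tclfmt | tclfmt.py | blockInfoGet
-- ===== SOURCE A (Python) =====
-- def blockInfoGet(lines):
--     lblock = 0
--     rblock = 0
--     lbracket = 0
--     rbracket = 0
--     for _, line in enumerate(lines):
--         lblock += line.count("{")
--         rblock += line.count("}")
--         lbracket += line.count("[")
--         rbracket += line.count("]")
--
--     return lblock, rblock, lbracket,rbracket
-- ===== SOURCE B (Python) =====
-- def blockInfoGet(lines):
--     # Join everything once; each count is obtained by measuring how much the
--     # text shrinks when that delimiter is deleted, instead of a counting scan.
--     text = "".join(lines)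
--     n = len(text)
--     return (n - len(text.replace("{", "")),
--             n - len(text.replace("}", "")),
--             n - len(text.replace("[", "")),
--             n - len(text.replace("]", "")))
-- ===== Notes on version B (the rewrite author's own statement) =====
-- stated objective: faster
-- what changed: B joins all lines into one string and derives each count as the length difference after deleting that delimiter with str.replace, instead of A's per-line str.count accumulation loop; one bulk join amortizes the per-line call overhead.
import Mathlib
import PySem

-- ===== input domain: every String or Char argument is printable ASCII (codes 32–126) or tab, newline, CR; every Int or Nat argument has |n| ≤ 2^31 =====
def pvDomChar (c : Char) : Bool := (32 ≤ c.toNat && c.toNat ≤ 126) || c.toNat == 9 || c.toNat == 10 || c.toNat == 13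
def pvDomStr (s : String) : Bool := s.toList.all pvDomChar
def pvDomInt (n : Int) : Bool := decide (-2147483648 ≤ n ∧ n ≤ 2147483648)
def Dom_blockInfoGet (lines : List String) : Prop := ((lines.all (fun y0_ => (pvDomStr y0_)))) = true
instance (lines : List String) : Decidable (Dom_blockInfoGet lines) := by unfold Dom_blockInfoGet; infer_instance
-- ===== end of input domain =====

-- B joins all lines once and derives each count as the length drop after deleting
-- that delimiter with str.replace; A accumulates four str.count scans per line. Equivalent.

-- ===== PORT A =====
-- literal transliteration: four counters, one pass over enumerate(lines), str.count per line
def blockInfoGet (lines : List String) : Int × Int × Int × Int :=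
  (PySem.List.enumerate lines).foldl
    (fun (acc : Int × Int × Int × Int) p =>
      (acc.1 + (PySem.Str.count p.2 "{" : Int),
       acc.2.1 + (PySem.Str.count p.2 "}" : Int),
       acc.2.2.1 + (PySem.Str.count p.2 "[" : Int),
       acc.2.2.2 + (PySem.Str.count p.2 "]" : Int)))
    (0, 0, 0, 0)

-- ===== PORT B =====
-- literal transliteration of Source B: join once, then count by deletion-length difference
def blockInfoGet_alt (lines : List String) : Int × Int × Int × Int :=
  let text := PySem.Str.join "" lines
  let n := PySem.Str.len text
  (n - PySem.Str.len (PySem.Str.replace text "{" ""),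
   n - PySem.Str.len (PySem.Str.replace text "}" ""),
   n - PySem.Str.len (PySem.Str.replace text "[" ""),
   n - PySem.Str.len (PySem.Str.replace text "]" ""))

-- ===== PRECONDITION & SPEC =====
def Spec_blockInfoGet (lines : List String) (out : Int × Int × Int × Int) : Prop := out = blockInfoGet_alt lines
instance (lines : List String) (out : Int × Int × Int × Int) : Decidable (Spec_blockInfoGet lines out) := by unfold Spec_blockInfoGet; infer_instance

-- ===== CLAIM (what is proved, stated in full; the proofs are below) =====
def Claim_equal_blockInfoGet : Prop := ∀ (lines : List String), Dom_blockInfoGet lines → Spec_blockInfoGet lines (blockInfoGet lines)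

-- ===== LEMMAS AND PROOFS =====

-- Chars.count with a single-character needle is List.count
theorem pv_countgo_single (c : Char) : ∀ (fuel : Nat) (l : List Char) (acc : Nat),
    l.length ≤ fuel → PySem.Chars.count.go [c] fuel l acc = acc + l.count c := by
  intro fuel
  induction fuel with
  | zero =>
    intro l acc h
    have : l = [] := List.eq_nil_of_length_eq_zero (Nat.le_zero.mp h)
    subst this
    simp [PySem.Chars.count.go]
  | succ n ih =>
    intro l acc h
    cases l with
    | nil => simp [PySem.Chars.count.go]
    | cons x t =>
      rw [PySem.Chars.count.go.eq_def]
      simp only [List.isPrefixOf]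
      by_cases hx : x = c
      · subst hx
        simp only [beq_self_eq_true, Bool.true_and]
        rw [if_pos (by simp)]
        rw [ih]
        · simp
          omega
        · simpa using Nat.le_of_succ_le_succ h
      · have hcx : (c == x) = false := by
          simp only [beq_eq_false_iff_ne, Ne]
          exact fun e => hx e.symm
        rw [if_neg (by rw [hcx]; exact Bool.false_ne_true)]
        have hxc : (x == c) = false := beq_eq_false_iff_ne.mpr hx
        rw [List.count_cons, hxc]
        simp only [Bool.false_eq_true, if_false, Nat.add_zero]
        exact ih t acc (Nat.le_of_succ_le_succ h)

theorem pv_strcount_single (s : String) (c : Char) (needle : String) (hc : needle.toList = [c]) :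
    PySem.Str.count s needle = s.toList.count c := by
  rw [PySem.Str.count_eq, hc]
  unfold PySem.Chars.count
  rw [show ([c].isEmpty) = false from rfl, if_neg Bool.false_ne_true]
  exact (pv_countgo_single c s.toList.length s.toList 0 le_rfl).trans (Nat.zero_add _)

-- Chars.replace with a single-char needle and empty replacement filters that char out
theorem pv_replacego_single (c : Char) : ∀ (fuel : Nat) (l : List Char) (acc : List Char),
    l.length ≤ fuel →
    PySem.Chars.replace.go [c] [] fuel l acc = acc.reverse ++ l.filter (fun x => !(x == c)) := by
  intro fuel
  induction fuel with
  | zero =>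
    intro l acc h
    have : l = [] := List.eq_nil_of_length_eq_zero (Nat.le_zero.mp h)
    subst this
    simp [PySem.Chars.replace.go]
  | succ n ih =>
    intro l acc h
    cases l with
    | nil => simp [PySem.Chars.replace.go]
    | cons x t =>
      rw [PySem.Chars.replace.go.eq_def]
      simp only [List.isPrefixOf]
      by_cases hx : x = c
      · subst hx
        simp only [beq_self_eq_true, Bool.true_and]
        rw [if_pos (by simp)]
        simp only [List.length_cons, List.length_nil, List.drop_succ_cons, List.drop_zero,
          List.reverse_nil, List.nil_append]
        rw [ih t acc (Nat.le_of_succ_le_succ h)]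
        simp [List.filter_cons]
      · have hcx : (c == x) = false := by
          simp only [beq_eq_false_iff_ne, Ne]
          exact fun e => hx e.symm
        rw [if_neg (by rw [hcx]; exact Bool.false_ne_true)]
        rw [ih t (x :: acc) (Nat.le_of_succ_le_succ h)]
        have hxc : (x == c) = false := beq_eq_false_iff_ne.mpr hx
        simp [hxc]

theorem pv_replace_single (s : List Char) (c : Char) :
    PySem.Chars.replace s [c] [] = s.filter (fun x => !(x == c)) := by
  unfold PySem.Chars.replace
  rw [show ([c].isEmpty) = false from rfl, if_neg Bool.false_ne_true]
  simpa using pv_replacego_single c s.length s [] le_rfl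

-- length minus length-after-deletion is the count
theorem pv_len_sub_filter (l : List Char) (c : Char) :
    (l.length : Int) - ((l.filter (fun x => !(x == c))).length : Int) = (l.count c : Int) := by
  have h1 : (l.filter (fun x => !(x == c))).length = l.countP (fun x => !(x == c)) := by
    simp [List.countP_eq_length_filter]
  have h2 : l.length = l.countP (fun x => x == c) + l.countP (fun x => !(x == c)) := by
    simpa using List.length_eq_countP_add_countP (p := fun x => x == c) (l := l)
  have h3 : l.count c = l.countP (fun x => x == c) := rfl
  rw [h1, h3]
  omega

-- joining with the empty separator flattens
theorem pv_join_nil_flatten (xss : List (List Char)) :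
    PySem.Chars.join [] xss = xss.flatten := by
  unfold PySem.Chars.join
  induction xss with
  | nil => rfl
  | cons x t ih =>
    cases t with
    | nil => simp [List.intercalate]
    | cons y u =>
      simp only [List.intercalate, List.intersperse] at ih ⊢
      simp_all [List.flatten]

-- casting a sum of Nats to Int
theorem pv_cast_sum (f : String → Nat) (l : List String) :
    (((l.map f).sum : Nat) : Int) = (l.map (fun s => (f s : Int))).sum := by
  induction l with
  | nil => rfl
  | cons x t ih => simp [List.sum_cons, ih]

-- A's fold accumulates the four per-line counts componentwise
theorem pv_A_foldl : ∀ (ps : List (Int × String)) (a b c d : Int),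
    ps.foldl
      (fun (acc : Int × Int × Int × Int) p =>
        (acc.1 + (PySem.Str.count p.2 "{" : Int),
         acc.2.1 + (PySem.Str.count p.2 "}" : Int),
         acc.2.2.1 + (PySem.Str.count p.2 "[" : Int),
         acc.2.2.2 + (PySem.Str.count p.2 "]" : Int)))
      (a, b, c, d)
    = (a + (ps.map (fun p => (PySem.Str.count p.2 "{" : Int))).sum,
       b + (ps.map (fun p => (PySem.Str.count p.2 "}" : Int))).sum,
       c + (ps.map (fun p => (PySem.Str.count p.2 "[" : Int))).sum,
       d + (ps.map (fun p => (PySem.Str.count p.2 "]" : Int))).sum) := by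
  intro ps
  induction ps with
  | nil => intro a b c d; simp
  | cons x t ih =>
    intro a b c d
    simp only [List.foldl_cons, List.map_cons, List.sum_cons, ih]
    refine Prod.ext (by ring) (Prod.ext (by ring) (Prod.ext (by ring) (by ring)))

theorem pv_enum_map_snd (lines : List String) : ∀ (i : Int),
    (PySem.List.enumerate lines i).map Prod.snd = lines := by
  induction lines with
  | nil => intro i; simp [PySem.List.enumerate]
  | cons x t ih => intro i; simp [PySem.List.enumerate, ih]

-- B's component for one delimiter equals the summed per-line counts
theorem pv_B_component (lines : List String) (c : Char) (needle : String)
    (hc : needle.toList = [c]) :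
    PySem.Str.len (PySem.Str.join "" lines)
      - PySem.Str.len (PySem.Str.replace (PySem.Str.join "" lines) needle "")
    = (lines.map (fun l => (l.toList.count c : Int))).sum := by
  set text := PySem.Str.join "" lines with htext
  have htl : text.toList = (lines.map String.toList).flatten := by
    rw [htext, PySem.Str.toList_join]
    exact pv_join_nil_flatten _
  rw [PySem.Str.len_eq, PySem.Str.len_eq, PySem.Str.toList_replace, hc]
  rw [show ("" : String).toList = [] from rfl, pv_replace_single]
  rw [pv_len_sub_filter]
  rw [htl, List.count_flatten, List.map_map]
  exact pv_cast_sum (fun s => s.toList.count c) lines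

-- ===== VERDICT (by name: the statement is the Claim_ definition above) =====
theorem blockInfoGet_spec : Claim_equal_blockInfoGet := by
  intro lines _
  unfold Spec_blockInfoGet blockInfoGet blockInfoGet_alt
  rw [pv_A_foldl]
  have key : ∀ (ch : Char) (needle : String), needle.toList = [ch] →
      ((PySem.List.enumerate lines).map (fun p => (PySem.Str.count p.2 needle : Int))).sum
      = (lines.map (fun l => (l.toList.count ch : Int))).sum := by
    intro ch needle hc
    have h1 : ((PySem.List.enumerate lines).map (fun p => (PySem.Str.count p.2 needle : Int)))
        = (((PySem.List.enumerate lines).map Prod.snd).map (fun s => (PySem.Str.count s needle : Int))) := by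
      rw [List.map_map]; rfl
    rw [h1, pv_enum_map_snd lines 0]
    congr 1
    exact List.map_congr_left (fun s _ => congrArg Nat.cast (pv_strcount_single s ch needle hc))
  refine Prod.ext ?_ (Prod.ext ?_ (Prod.ext ?_ ?_)) <;>
    simp only [zero_add] <;>
    [rw [key '{' "{" rfl, ← pv_B_component lines '{' "{" rfl];
     rw [key '}' "}" rfl, ← pv_B_component lines '}' "}" rfl];
     rw [key '[' "[" rfl, ← pv_B_component lines '[' "[" rfl];
     rw [key ']' "]" rfl, ← pv_B_component lines ']' "]" rfl]]
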